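-- pv_equiv track=rewrite | github.com/wardae98/pythonsolutions | solution-3.py | similar_license_plates
-- ===== SOURCE A (Python) =====
-- def similar_license_plates(plate1,plate2):
--     similar_1 = ["0","O","Q"]
--     similar_2 = ["1","I","T"]
--     similar_3 = ["2","Z"]
--     similar_4 = ["5", "S"]
--     similar_5 = ["8", "B"]
--     if plate1.replace(" ","") == plate2.replace(" ",""):
--         return True
--     elif any(x in plate1.replace(" ","") for x in similar_1) and any(x in plate2.replace(" ","") for x in similar_1):
--         return True
--     elif any(x in plate1.replace(" ","") for x in similar_2) and any(x in plate2.replace(" ","") for x in similar_2):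
--         return True
--     elif any(x in plate1.replace(" ","") for x in similar_3) and any(x in plate2.replace(" ","") for x in similar_3):
--         return True
--     elif any(x in plate1.replace(" ","") for x in similar_4) and any(x in plate2.replace(" ","") for x in similar_4):
--         return True
--     elif any(x in plate1.replace(" ","") for x in similar_5) and any(x in plate2.replace(" ","") for x in similar_5):
--         return True
--     else:
--         return False
-- ===== SOURCE B (Python) =====
-- # Canonicalization table: each confusable character maps to its group's representative.
-- CANON = {"0": "0", "O": "0", "Q": "0",
--          "1": "1", "I": "1", "T": "1",
--          "2": "2", "Z": "2",
--          "5": "5", "S": "5",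
--          "8": "8", "B": "8"}
--
-- def similar_license_plates(plate1, plate2):
--     s1 = plate1.replace(" ", "")
--     s2 = plate2.replace(" ", "")
--     if s1 == s2:
--         return True
--     # index plate1 once: the canonical representatives of its confusable chars
--     seen = {CANON[c] for c in s1 if c in CANON}
--     # single scan of plate2 with early exit
--     for c in s2:
--         if CANON.get(c) in seen:
--             return True
--     return False
-- ===== Notes on version B (the rewrite author's own statement) =====
-- stated objective: simpler
-- what changed: Replaces the five-branch elif chain of per-group any()-substring scans with a char-to-canonical-representative lookup table: plate1 is indexed once into a set of canonicals, then plate2 is scanned a single time with an early return on the first char whose canonical was seen.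
import Mathlib
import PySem

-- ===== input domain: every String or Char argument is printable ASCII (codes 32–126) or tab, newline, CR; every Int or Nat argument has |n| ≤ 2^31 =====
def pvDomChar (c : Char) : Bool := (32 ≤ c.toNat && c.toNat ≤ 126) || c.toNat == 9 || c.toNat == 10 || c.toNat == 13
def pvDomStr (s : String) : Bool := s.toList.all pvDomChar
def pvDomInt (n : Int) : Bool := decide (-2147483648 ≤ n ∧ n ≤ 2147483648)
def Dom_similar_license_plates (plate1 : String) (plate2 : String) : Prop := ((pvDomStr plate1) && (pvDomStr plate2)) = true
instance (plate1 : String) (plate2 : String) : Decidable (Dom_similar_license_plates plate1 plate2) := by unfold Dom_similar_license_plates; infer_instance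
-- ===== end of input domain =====

-- B replaces the five-branch elif chain of per-group substring scans with a
-- char→canonical-representative table: plate1 is indexed once into a set of
-- canonicals, plate2 is scanned once with an early exit (objective: simpler).

-- ===== PORT A =====
def similar_license_plates (plate1 : String) (plate2 : String) : Bool :=
  let similar_1 : List String := ["0", "O", "Q"]
  let similar_2 : List String := ["1", "I", "T"]
  let similar_3 : List String := ["2", "Z"]
  let similar_4 : List String := ["5", "S"]
  let similar_5 : List String := ["8", "B"]
  if PySem.Str.replace plate1 " " "" == PySem.Str.replace plate2 " " "" then true
  else if similar_1.any (fun x => PySem.Str.isIn x (PySem.Str.replace plate1 " " "")) &&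
          similar_1.any (fun x => PySem.Str.isIn x (PySem.Str.replace plate2 " " "")) then true
  else if similar_2.any (fun x => PySem.Str.isIn x (PySem.Str.replace plate1 " " "")) &&
          similar_2.any (fun x => PySem.Str.isIn x (PySem.Str.replace plate2 " " "")) then true
  else if similar_3.any (fun x => PySem.Str.isIn x (PySem.Str.replace plate1 " " "")) &&
          similar_3.any (fun x => PySem.Str.isIn x (PySem.Str.replace plate2 " " "")) then true
  else if similar_4.any (fun x => PySem.Str.isIn x (PySem.Str.replace plate1 " " "")) &&
          similar_4.any (fun x => PySem.Str.isIn x (PySem.Str.replace plate2 " " "")) then true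
  else if similar_5.any (fun x => PySem.Str.isIn x (PySem.Str.replace plate1 " " "")) &&
          similar_5.any (fun x => PySem.Str.isIn x (PySem.Str.replace plate2 " " "")) then true
  else false

-- ===== PORT B =====
-- CANON = {"0":"0","O":"0","Q":"0","1":"1","I":"1","T":"1","2":"2","Z":"2","5":"5","S":"5","8":"8","B":"8"}
-- (1-character Python strings are ported as Char)
def pvCanon : PySem.Dict Char Char :=
  PySem.Dict.ofList
    [('0', '0'), ('O', '0'), ('Q', '0'),
     ('1', '1'), ('I', '1'), ('T', '1'),
     ('2', '2'), ('Z', '2'),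
     ('5', '5'), ('S', '5'),
     ('8', '8'), ('B', '8')]

def similar_license_plates_alt (plate1 : String) (plate2 : String) : Bool :=
  let s1 := PySem.Str.replace plate1 " " ""
  let s2 := PySem.Str.replace plate2 " " ""
  if s1 == s2 then true
  else
    -- seen = {CANON[c] for c in s1 if c in CANON}
    let seen : PySem.Set Char :=
      PySem.Set.ofList (s1.toList.filterMap (fun c => PySem.Dict.get? pvCanon c))
    -- for c in s2: if CANON.get(c) in seen: return True  (None is never in seen)
    s2.toList.any (fun c =>
      match PySem.Dict.get? pvCanon c with
      | some d => PySem.Set.contains seen d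
      | none => false)

-- ===== PRECONDITION & SPEC =====
def Spec_similar_license_plates (plate1 : String) (plate2 : String) (out : Bool) : Prop := out = similar_license_plates_alt plate1 plate2
instance (plate1 : String) (plate2 : String) (out : Bool) : Decidable (Spec_similar_license_plates plate1 plate2 out) := by unfold Spec_similar_license_plates; infer_instance

-- ===== CLAIM (what is proved, stated in full; the proofs are below) =====
def Claim_equal_similar_license_plates : Prop := ∀ (plate1 : String) (plate2 : String), Dom_similar_license_plates plate1 plate2 → Spec_similar_license_plates plate1 plate2 (similar_license_plates plate1 plate2)

-- ===== LEMMAS AND PROOFS =====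
theorem pvIsIn_single (c : Char) (r : String) :
    PySem.Str.isIn (String.ofList [c]) r = r.toList.contains c := by
  rw [Bool.eq_iff_iff]
  simp [PySem.Chars.isIn_iff_infix, List.singleton_infix_iff]

theorem pvCanon_get (c d : Char) :
    PySem.Dict.get? pvCanon c = some d ↔
      (c = '0' ∧ d = '0') ∨ (c = 'O' ∧ d = '0') ∨ (c = 'Q' ∧ d = '0') ∨
      (c = '1' ∧ d = '1') ∨ (c = 'I' ∧ d = '1') ∨ (c = 'T' ∧ d = '1') ∨
      (c = '2' ∧ d = '2') ∨ (c = 'Z' ∧ d = '2') ∨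
      (c = '5' ∧ d = '5') ∨ (c = 'S' ∧ d = '5') ∨
      (c = '8' ∧ d = '8') ∨ (c = 'B' ∧ d = '8') := by
  rw [PySem.Dict.get?_eq_some_iff_mem_items _ _ _ (by decide)]
  rw [show pvCanon.items =
      [('0', '0'), ('O', '0'), ('Q', '0'),
       ('1', '1'), ('I', '1'), ('T', '1'),
       ('2', '2'), ('Z', '2'),
       ('5', '5'), ('S', '5'),
       ('8', '8'), ('B', '8')] from by decide]
  simp [Prod.mk.injEq]

theorem pvHasCanon (d : Char) (s : List Char) :
    (∃ c ∈ s, PySem.Dict.get? pvCanon c = some d) ↔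
      (d = '0' ∧ ('0' ∈ s ∨ 'O' ∈ s ∨ 'Q' ∈ s)) ∨
      (d = '1' ∧ ('1' ∈ s ∨ 'I' ∈ s ∨ 'T' ∈ s)) ∨
      (d = '2' ∧ ('2' ∈ s ∨ 'Z' ∈ s)) ∨
      (d = '5' ∧ ('5' ∈ s ∨ 'S' ∈ s)) ∨
      (d = '8' ∧ ('8' ∈ s ∨ 'B' ∈ s)) := by
  constructor
  · rintro ⟨c, hc, hget⟩
    rw [pvCanon_get] at hget
    rcases hget with ⟨rfl, rfl⟩ | ⟨rfl, rfl⟩ | ⟨rfl, rfl⟩ | ⟨rfl, rfl⟩ | ⟨rfl, rfl⟩ | ⟨rfl, rfl⟩ |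
      ⟨rfl, rfl⟩ | ⟨rfl, rfl⟩ | ⟨rfl, rfl⟩ | ⟨rfl, rfl⟩ | ⟨rfl, rfl⟩ | ⟨rfl, rfl⟩ <;> tauto
  · rintro (⟨rfl, h⟩ | ⟨rfl, h⟩ | ⟨rfl, h⟩ | ⟨rfl, h⟩ | ⟨rfl, h⟩)
    · rcases h with h | h | h
      exacts [⟨'0', h, by decide⟩, ⟨'O', h, by decide⟩, ⟨'Q', h, by decide⟩]
    · rcases h with h | h | h
      exacts [⟨'1', h, by decide⟩, ⟨'I', h, by decide⟩, ⟨'T', h, by decide⟩]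
    · rcases h with h | h
      exacts [⟨'2', h, by decide⟩, ⟨'Z', h, by decide⟩]
    · rcases h with h | h
      exacts [⟨'5', h, by decide⟩, ⟨'S', h, by decide⟩]
    · rcases h with h | h
      exacts [⟨'8', h, by decide⟩, ⟨'B', h, by decide⟩]

theorem pvHit (seen : PySem.Set Char) (c : Char) :
    ((match PySem.Dict.get? pvCanon c with
      | some d => PySem.Set.contains seen d
      | none => false) = true) ↔
      ∃ d, PySem.Dict.get? pvCanon c = some d ∧ d ∈ seen := by
  cases h : PySem.Dict.get? pvCanon c
  · simp
  · simp [PySem.Set.contains]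

theorem pvIte_or (c b : Bool) : ((if c = true then true else b) = true) ↔ (c = true ∨ b = true) := by
  cases c <;> simp

-- ===== VERDICT (by name: the statement is the Claim_ definition above) =====
set_option maxHeartbeats 1000000 in
theorem similar_license_plates_spec : Claim_equal_similar_license_plates := by
  intro plate1 plate2 _
  unfold Spec_similar_license_plates similar_license_plates similar_license_plates_alt
  set r1 := PySem.Str.replace plate1 " " "" with hr1
  set r2 := PySem.Str.replace plate2 " " "" with hr2
  by_cases heq : (r1 == r2) = true
  · simp [heq]
  · rw [Bool.not_eq_true] at heq
    simp only [heq, Bool.false_eq_true, if_false]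
    rw [Bool.eq_iff_iff, List.any_eq_true]
    have hB : (∃ c ∈ r2.toList,
        (match PySem.Dict.get? pvCanon c with
          | some d => PySem.Set.contains
              (PySem.Set.ofList (r1.toList.filterMap (fun c => PySem.Dict.get? pvCanon c))) d
          | none => false) = true) ↔
        ∃ d, (∃ c ∈ r2.toList, PySem.Dict.get? pvCanon c = some d) ∧
             (∃ c ∈ r1.toList, PySem.Dict.get? pvCanon c = some d) := by
      constructor
      · rintro ⟨c, hc, hm⟩
        rw [pvHit] at hm
        rcases hm with ⟨d, hgd, hd⟩
        rw [PySem.Set.mem_ofList, List.mem_filterMap] at hd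
        exact ⟨d, ⟨c, hc, hgd⟩, hd⟩
      · rintro ⟨d, ⟨c2, hc2, hg2⟩, hd1⟩
        refine ⟨c2, hc2, (pvHit _ _).mpr ⟨d, hg2, ?_⟩⟩
        rw [PySem.Set.mem_ofList, List.mem_filterMap]
        exact hd1
    rw [hB]
    have h0 : "0" = String.ofList ['0'] := rfl
    have hO : "O" = String.ofList ['O'] := rfl
    have hQ : "Q" = String.ofList ['Q'] := rfl
    have h1 : "1" = String.ofList ['1'] := rfl
    have hI : "I" = String.ofList ['I'] := rfl
    have hT : "T" = String.ofList ['T'] := rfl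
    have h2 : "2" = String.ofList ['2'] := rfl
    have hZ : "Z" = String.ofList ['Z'] := rfl
    have h5 : "5" = String.ofList ['5'] := rfl
    have hS : "S" = String.ofList ['S'] := rfl
    have h8 : "8" = String.ofList ['8'] := rfl
    have hB' : "B" = String.ofList ['B'] := rfl
    simp only [List.any_cons, List.any_nil, h0, hO, hQ, h1, hI, hT, h2, hZ, h5, hS, h8, hB',
      pvIsIn_single, Bool.or_false]
    simp only [pvIte_or]
    simp only [Bool.and_eq_true, Bool.or_eq_true, List.contains_iff_mem, Bool.false_eq_true,
      or_false]
    constructor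
    · rintro (⟨ha, hb⟩ | ⟨ha, hb⟩ | ⟨ha, hb⟩ | ⟨ha, hb⟩ | ⟨ha, hb⟩)
      · exact ⟨'0', (pvHasCanon _ _).mpr (Or.inl ⟨rfl, hb⟩),
          (pvHasCanon _ _).mpr (Or.inl ⟨rfl, ha⟩)⟩
      · exact ⟨'1', (pvHasCanon _ _).mpr (Or.inr (Or.inl ⟨rfl, hb⟩)),
          (pvHasCanon _ _).mpr (Or.inr (Or.inl ⟨rfl, ha⟩))⟩
      · exact ⟨'2', (pvHasCanon _ _).mpr (Or.inr (Or.inr (Or.inl ⟨rfl, hb⟩))),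
          (pvHasCanon _ _).mpr (Or.inr (Or.inr (Or.inl ⟨rfl, ha⟩)))⟩
      · exact ⟨'5', (pvHasCanon _ _).mpr (Or.inr (Or.inr (Or.inr (Or.inl ⟨rfl, hb⟩)))),
          (pvHasCanon _ _).mpr (Or.inr (Or.inr (Or.inr (Or.inl ⟨rfl, ha⟩))))⟩
      · exact ⟨'8', (pvHasCanon _ _).mpr (Or.inr (Or.inr (Or.inr (Or.inr ⟨rfl, hb⟩)))),
          (pvHasCanon _ _).mpr (Or.inr (Or.inr (Or.inr (Or.inr ⟨rfl, ha⟩))))⟩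
    · rintro ⟨d, hd2, hd1⟩
      rw [pvHasCanon] at hd1 hd2
      rcases hd1 with ⟨rfl, ha⟩ | ⟨rfl, ha⟩ | ⟨rfl, ha⟩ | ⟨rfl, ha⟩ | ⟨rfl, ha⟩ <;>
        rcases hd2 with ⟨he, hb⟩ | ⟨he, hb⟩ | ⟨he, hb⟩ | ⟨he, hb⟩ | ⟨he, hb⟩ <;>
        first
          | (exact absurd he (by decide))
          | exact Or.inl ⟨ha, hb⟩
          | exact Or.inr (Or.inl ⟨ha, hb⟩)
          | exact Or.inr (Or.inr (Or.inl ⟨ha, hb⟩))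
          | exact Or.inr (Or.inr (Or.inr (Or.inl ⟨ha, hb⟩)))
          | exact Or.inr (Or.inr (Or.inr (Or.inr ⟨ha, hb⟩)))
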